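-- pv_equiv track=rewrite | github.com/orchidzz/CodeforcesProblems | 1613C.py | solve
-- ===== SOURCE A (Python) =====
-- def solve(n, h, a):
--     left = 0
--     right = h
--     k = h
--     while left <= right:
--         k = (left+right)>>1
--         total = 0
--         for i in range(n):
--             if i<n-1:
--                 total += min(k, a[i+1] - a[i])
--             else:
--                 total += k
--         if total < h:
--             left = k+1
--             k = left
--         else:
--             right = k-1
--     return k
-- ===== SOURCE B (Python) =====
-- def solve(n, h, a):
--     # Sort the consecutive gaps once and build prefix sums, so each total(k)
--     # is evaluated in O(log n) by binary search instead of an O(n) scan.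
--     gaps = sorted(a[i + 1] - a[i] for i in range(n - 1))
--     m = len(gaps)
--     pref = [0]
--     for g in gaps:
--         pref.append(pref[-1] + g)
--
--     def first(lo, hi, pred):
--         # smallest x in [lo, hi] with pred(x); pred monotone, hi is the sentinel
--         while lo < hi:
--             mid = (lo + hi) // 2
--             if pred(mid):
--                 hi = mid
--             else:
--                 lo = mid + 1
--         return lo
--
--     def reaches(k):
--         j = first(0, m, lambda i: gaps[i] >= k)  # gaps[0:j] are the gaps < k
--         t = pref[j] + (m - j) * k
--         if n >= 1:
--             t += k
--         return t >= h
--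
--     return first(0, h + 1, reaches)
-- ===== Notes on version B (the rewrite author's own statement) =====
-- stated objective: faster
-- what changed: A rescans all n points to recompute total(k) inside every step of the outer binary search; B sorts the consecutive gaps once, builds prefix sums, and evaluates each total(k) with an inner binary search over the sorted gaps, so the outer search costs O(log n) per step instead of O(n).
-- outside the precondition, e.g. on solve(1, -5, [0]): A returns -5, B returns 0
import Mathlib
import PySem

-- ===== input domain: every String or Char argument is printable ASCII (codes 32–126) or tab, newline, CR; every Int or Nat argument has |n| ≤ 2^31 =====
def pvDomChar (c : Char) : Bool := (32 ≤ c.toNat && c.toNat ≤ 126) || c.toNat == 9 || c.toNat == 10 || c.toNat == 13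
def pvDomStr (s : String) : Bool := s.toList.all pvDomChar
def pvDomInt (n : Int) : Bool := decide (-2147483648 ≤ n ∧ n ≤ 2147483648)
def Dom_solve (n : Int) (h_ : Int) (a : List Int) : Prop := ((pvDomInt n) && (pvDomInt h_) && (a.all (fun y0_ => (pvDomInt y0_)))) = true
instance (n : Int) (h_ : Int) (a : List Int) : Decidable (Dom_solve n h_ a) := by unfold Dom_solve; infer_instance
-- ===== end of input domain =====

-- B replaces A's O(n) rescan of the array inside each step of the binary search on k by
-- sorted gaps + prefix sums queried by an inner binary search.

-- ===== PORT A =====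
-- the inner 'for i in range(n)' accumulation of total for a given k
def totalA (n k : Int) (a : List Int) : Int :=
  (PySem.List.pyRange 0 n 1).foldl
    (fun total i =>
      if i < n - 1 then total + min k (PySem.List.pyGetD a (i + 1) 0 - PySem.List.pyGetD a i 0)
      else total + k) 0

-- the 'while left <= right' loop
def solveLoop (n h_ : Int) (a : List Int) (left right k : Int) : Int :=
  if _hlr : left ≤ right then
    let k' := PySem.Int.floordiv (left + right) 2
    let total := totalA n k' a
    if total < h_ then solveLoop n h_ a (k' + 1) right (k' + 1)
    else solveLoop n h_ a left (k' - 1) k'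
  else k
termination_by (right + 1 - left).toNat
decreasing_by
  · have := PySem.Int.floordiv_two_mid_bounds _hlr
    omega
  · have := PySem.Int.floordiv_two_mid_bounds _hlr
    omega

def solve (n : Int) (h_ : Int) (a : List Int) : Int :=
  solveLoop n h_ a 0 h_ h_

-- ===== PORT B =====
-- helper 'first(lo, hi, pred)': smallest x in [lo, hi] with pred x (hi is the sentinel)
def firstB (lo hi : Int) (pred : Int → Bool) : Int :=
  if _hlo : lo < hi then
    let mid := PySem.Int.floordiv (lo + hi) 2
    if pred mid then firstB lo mid pred else firstB (mid + 1) hi pred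
  else lo
termination_by (hi - lo).toNat
decreasing_by
  · have _h1 := PySem.Int.floordiv_two_mid_bounds (le_of_lt _hlo)
    have h2 : PySem.Int.floordiv (lo + hi) 2 < hi :=
      (PySem.Int.floordiv_lt_iff_lt_mul (by omega)).mpr (by omega)
    omega
  · have := PySem.Int.floordiv_two_mid_bounds (le_of_lt _hlo)
    omega

def solve_alt (n : Int) (h_ : Int) (a : List Int) : Int :=
  let gaps := PySem.List.sorted
    ((PySem.List.pyRange 0 (n - 1) 1).map
      (fun i => PySem.List.pyGetD a (i + 1) 0 - PySem.List.pyGetD a i 0)) (fun x => x) false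
  let m : Int := gaps.length
  let pref := gaps.foldl (fun p g => p ++ [PySem.List.pyGetD p (-1) 0 + g]) [0]
  let reaches := fun (k : Int) =>
    let j := firstB 0 m (fun i => decide (PySem.List.pyGetD gaps i 0 ≥ k))
    let t := PySem.List.pyGetD pref j 0 + (m - j) * k
    let t := if n ≥ 1 then t + k else t
    decide (t ≥ h_)
  firstB 0 (h_ + 1) reaches

-- ===== PRECONDITION & SPEC =====
-- Pre_ excludes (a) inputs where Python raises IndexError (n ≥ 2 with fewer than n points), and
-- (b) negative h, outside the problem's natural domain (h is a height ≥ 1): there A never enters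
-- its search and returns its initial placeholder k = h, while B's search over [0, h+1) returns 0.
def Pre_solve (n : Int) (h_ : Int) (a : List Int) : Prop :=
  0 ≤ h_ ∧ (n ≤ 1 ∨ n ≤ (a.length : Int))
instance (n : Int) (h_ : Int) (a : List Int) : Decidable (Pre_solve n h_ a) := by
  unfold Pre_solve; infer_instance

def pvWitness_solve : Int × Int × List Int := (3, 5, [0, 2, 10])

def Spec_solve (n : Int) (h_ : Int) (a : List Int) (out : Int) : Prop := out = solve_alt n h_ a
instance (n : Int) (h_ : Int) (a : List Int) (out : Int) : Decidable (Spec_solve n h_ a out) := by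
  unfold Spec_solve; infer_instance

-- ===== CLAIM (what is proved, stated in full; the proofs are below) =====
def Claim_equal_solve : Prop := ∀ (n : Int) (h_ : Int) (a : List Int),
  Dom_solve n h_ a → Pre_solve n h_ a → Spec_solve n h_ a (solve n h_ a)

-- ===== LEMMAS AND PROOFS =====

-- the unsorted list of consecutive gaps, as both ports compute it
def rawGaps (n : Int) (a : List Int) : List Int :=
  (PySem.List.pyRange 0 (n - 1) 1).map
    (fun i => PySem.List.pyGetD a (i + 1) 0 - PySem.List.pyGetD a i 0)

def sGaps (n : Int) (a : List Int) : List Int :=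
  PySem.List.sorted (rawGaps n a) (fun x => x) false

def prefStep (p : List Int) (g : Int) : List Int := p ++ [PySem.List.pyGetD p (-1) 0 + g]

-- the index j = first(0, m, gaps[i] >= k) that B's 'reaches' computes
def idxJ (n : Int) (a : List Int) (k : Int) : Int :=
  firstB 0 ((sGaps n a).length : Int) (fun i => decide (PySem.List.pyGetD (sGaps n a) i 0 ≥ k))

-- B's total for a given k, unfolded from solve_alt
def totalB (n : Int) (a : List Int) (k : Int) : Int :=
  if n ≥ 1 then
    PySem.List.pyGetD ((sGaps n a).foldl prefStep [0]) (idxJ n a k) 0 +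
      (((sGaps n a).length : Int) - idxJ n a k) * k + k
  else
    PySem.List.pyGetD ((sGaps n a).foldl prefStep [0]) (idxJ n a k) 0 +
      (((sGaps n a).length : Int) - idxJ n a k) * k

theorem solve_alt_eq (n h_ : Int) (a : List Int) :
    solve_alt n h_ a = firstB 0 (h_ + 1) (fun k => decide (totalB n a k ≥ h_)) := rfl

-- ---- firstB specification ----
theorem firstB_spec_aux (pred : Int → Bool) :
    ∀ (N : Nat) (lo hi : Int), (hi - lo).toNat ≤ N → lo ≤ hi →
    (∀ x y, lo ≤ x → x ≤ y → y < hi → pred x = true → pred y = true) →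
    lo ≤ firstB lo hi pred ∧ firstB lo hi pred ≤ hi ∧
    (∀ x, lo ≤ x → x < firstB lo hi pred → pred x = false) ∧
    (firstB lo hi pred < hi → pred (firstB lo hi pred) = true) := by
  intro N
  induction N with
  | zero =>
    intro lo hi hN hle _mono
    have heq : lo = hi := by omega
    rw [firstB, dif_neg (by omega)]
    exact ⟨le_refl _, hle, fun x hx hx' => by omega, fun h => by omega⟩
  | succ N ih =>
    intro lo hi hN hle mono
    by_cases hlt : lo < hi
    · have hb := PySem.Int.floordiv_two_mid_bounds (le_of_lt hlt)
      have hb2 : PySem.Int.floordiv (lo + hi) 2 < hi :=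
        (PySem.Int.floordiv_lt_iff_lt_mul (by omega)).mpr (by omega)
      set mid := PySem.Int.floordiv (lo + hi) 2 with hmid
      have heq : firstB lo hi pred =
          if pred mid then firstB lo mid pred else firstB (mid + 1) hi pred := by
        rw [firstB, dif_pos hlt]
      by_cases hp : pred mid = true
      · rw [heq, if_pos hp]
        obtain ⟨i1, i2, i3, i4⟩ := ih lo mid (by omega) (by omega)
          (fun x y hx hxy hy hpx => mono x y hx hxy (by omega) hpx)
        refine ⟨i1, by omega, i3, fun _ => ?_⟩
        by_cases hr : firstB lo mid pred < mid
        · exact i4 hr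
        · have : firstB lo mid pred = mid := by omega
          rw [this]; exact hp
      · rw [heq, if_neg hp]
        obtain ⟨i1, i2, i3, i4⟩ := ih (mid + 1) hi (by omega) (by omega)
          (fun x y hx hxy hy hpx => mono x y (by omega) hxy hy hpx)
        refine ⟨by omega, i2, ?_, i4⟩
        intro x hx hxr
        by_cases hxm : x ≤ mid
        · cases hpx : pred x
          · rfl
          · exact absurd (mono x mid hx hxm hb2 hpx) hp
        · exact i3 x (by omega) hxr
    · rw [firstB, dif_neg hlt]
      exact ⟨le_refl _, hle, fun x hx hx' => by omega, fun h => absurd h hlt⟩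

theorem firstB_spec (pred : Int → Bool) (lo hi : Int) (hle : lo ≤ hi)
    (mono : ∀ x y, lo ≤ x → x ≤ y → y < hi → pred x = true → pred y = true) :
    lo ≤ firstB lo hi pred ∧ firstB lo hi pred ≤ hi ∧
    (∀ x, lo ≤ x → x < firstB lo hi pred → pred x = false) ∧
    (firstB lo hi pred < hi → pred (firstB lo hi pred) = true) :=
  firstB_spec_aux pred (hi - lo).toNat lo hi le_rfl hle mono

-- ---- solveLoop specification ----
theorem solveLoop_spec_aux (n h_ : Int) (a : List Int)
    (mono : ∀ x y, x ≤ y → totalA n x a ≤ totalA n y a) :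
    ∀ (N : Nat) (l r k : Int), (r + 1 - l).toNat ≤ N → l ≤ r + 1 → (l = r + 1 → k = l) →
    l ≤ solveLoop n h_ a l r k ∧ solveLoop n h_ a l r k ≤ r + 1 ∧
    (∀ x, l ≤ x → x < solveLoop n h_ a l r k → totalA n x a < h_) ∧
    (solveLoop n h_ a l r k ≤ r → h_ ≤ totalA n (solveLoop n h_ a l r k) a) := by
  intro N
  induction N with
  | zero =>
    intro l r k hN hle hk
    have hlr : l = r + 1 := by omega
    rw [solveLoop, dif_neg (by omega), hk hlr]
    exact ⟨le_refl _, hle, fun x hx hx' => by omega, fun h => by omega⟩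
  | succ N ih =>
    intro l r k hN hle hk
    by_cases hlr : l ≤ r
    · have hb := PySem.Int.floordiv_two_mid_bounds hlr
      set mid := PySem.Int.floordiv (l + r) 2 with hmid
      have heq : solveLoop n h_ a l r k =
          if totalA n mid a < h_ then solveLoop n h_ a (mid + 1) r (mid + 1)
          else solveLoop n h_ a l (mid - 1) mid := by
        rw [solveLoop, dif_pos hlr]
      by_cases ht : totalA n mid a < h_
      · rw [heq, if_pos ht]
        obtain ⟨i1, i2, i3, i4⟩ := ih (mid + 1) r (mid + 1) (by omega) (by omega) (fun _ => rfl)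
        refine ⟨by omega, i2, ?_, i4⟩
        intro x hx hxr
        by_cases hxm : x ≤ mid
        · exact lt_of_le_of_lt (mono x mid hxm) ht
        · exact i3 x (by omega) hxr
      · rw [heq, if_neg ht]
        obtain ⟨i1, i2, i3, i4⟩ := ih l (mid - 1) mid (by omega) (by omega) (by omega)
        refine ⟨i1, by omega, i3, fun _ => ?_⟩
        by_cases hr : solveLoop n h_ a l (mid - 1) mid ≤ mid - 1
        · exact i4 hr
        · have : solveLoop n h_ a l (mid - 1) mid = mid := by omega
          rw [this]; exact not_lt.mp ht
    · rw [solveLoop, dif_neg hlr, hk (by omega)]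
      exact ⟨le_refl _, hle, fun x hx hx' => by omega, fun h => by omega⟩

theorem solveLoop_spec (n h_ : Int) (a : List Int)
    (mono : ∀ x y, x ≤ y → totalA n x a ≤ totalA n y a) :
    ∀ l r k, l ≤ r + 1 → (l = r + 1 → k = l) →
    l ≤ solveLoop n h_ a l r k ∧ solveLoop n h_ a l r k ≤ r + 1 ∧
    (∀ x, l ≤ x → x < solveLoop n h_ a l r k → totalA n x a < h_) ∧
    (solveLoop n h_ a l r k ≤ r → h_ ≤ totalA n (solveLoop n h_ a l r k) a) :=
  fun l r k h1 h2 => solveLoop_spec_aux n h_ a mono (r + 1 - l).toNat l r k le_rfl h1 h2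

-- ---- uniqueness of the "first point" characterisation ----
theorem least_unique (P : Int → Prop) (lo hi v w : Int)
    (hv1 : lo ≤ v) (hv2 : v ≤ hi) (hv3 : ∀ x, lo ≤ x → x < v → ¬ P x) (hv4 : v < hi → P v)
    (hw1 : lo ≤ w) (hw2 : w ≤ hi) (hw3 : ∀ x, lo ≤ x → x < w → ¬ P x) (hw4 : w < hi → P w) :
    v = w := by
  rcases lt_trichotomy v w with h | h | h
  · exact absurd (hv4 (lt_of_lt_of_le h hw2)) (hw3 v hv1 h)
  · exact h
  · exact absurd (hw4 (lt_of_lt_of_le h hv2)) (hv3 w hw1 h)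

-- ---- closed forms for totalA ----
theorem totalA_nonpos (n k : Int) (a : List Int) (hn : n ≤ 0) : totalA n k a = 0 := by
  unfold totalA
  rw [PySem.List.pyRange_one_eq_nil hn]
  rfl

theorem totalA_pos (n k : Int) (a : List Int) (hn : 1 ≤ n) :
    totalA n k a = ((rawGaps n a).map (fun g => min k g)).sum + k := by
  unfold totalA rawGaps
  have hsplit : PySem.List.pyRange 0 n 1 = PySem.List.pyRange 0 (n - 1) 1 ++ [n - 1] := by
    have := PySem.List.pyRange_one_succ_right (a := 0) (b := n - 1) (by omega)
    rw [show n - 1 + 1 = n by ring] at this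
    exact this
  rw [hsplit, List.foldl_append]
  simp only [List.foldl_cons, List.foldl_nil]
  rw [if_neg (lt_irrefl (n - 1))]
  rw [PySem.List.foldl_congr_mem (PySem.List.pyRange 0 (n - 1) 1) _
    (fun total i => total + min k (PySem.List.pyGetD a (i + 1) 0 - PySem.List.pyGetD a i 0)) 0
    (fun acc x hx => by
      have := PySem.List.mem_pyRange_one.mp hx
      rw [if_pos this.2])]
  rw [PySem.List.foldl_add]
  rw [zero_add, List.map_map]
  rfl

theorem totalA_mono (n : Int) (a : List Int) :
    ∀ x y, x ≤ y → totalA n x a ≤ totalA n y a := by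
  intro x y hxy
  rcases le_or_gt n 0 with hn | hn
  · rw [totalA_nonpos n x a hn, totalA_nonpos n y a hn]
  · rw [totalA_pos n x a (by omega), totalA_pos n y a (by omega)]
    have hsum : ((rawGaps n a).map (fun g => min x g)).sum ≤
        ((rawGaps n a).map (fun g => min y g)).sum :=
      List.sum_le_sum (fun g _ => min_le_min hxy (le_refl g))
    omega

-- ---- prefix-sum list ----
theorem prefStep_singleton (s x : Int) : prefStep [s] x = [s] ++ [s + x] := by
  unfold prefStep
  rw [show ([s] : List Int) = [] ++ [s] by rfl, PySem.List.pyGetD_neg_one_append_singleton]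

theorem foldl_prefStep_append (g : List Int) :
    ∀ (acc : List Int) (s : Int), g.foldl prefStep (acc ++ [s]) = acc ++ g.foldl prefStep [s] := by
  induction g with
  | nil => intro acc s; rfl
  | cons x g ih =>
    intro acc s
    have h1 : prefStep (acc ++ [s]) x = (acc ++ [s]) ++ [s + x] := by
      unfold prefStep
      rw [PySem.List.pyGetD_neg_one_append_singleton]
    calc (x :: g).foldl prefStep (acc ++ [s])
        = g.foldl prefStep ((acc ++ [s]) ++ [s + x]) := by rw [List.foldl_cons, h1]
      _ = (acc ++ [s]) ++ g.foldl prefStep [s + x] := ih (acc ++ [s]) (s + x)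
      _ = acc ++ ([s] ++ g.foldl prefStep [s + x]) := by rw [List.append_assoc]
      _ = acc ++ (g.foldl prefStep ([s] ++ [s + x])) := by rw [ih [s] (s + x)]
      _ = acc ++ ((x :: g).foldl prefStep [s]) := by rw [List.foldl_cons, prefStep_singleton]

theorem foldl_prefStep_cons (g : List Int) (x s : Int) :
    (x :: g).foldl prefStep [s] = s :: g.foldl prefStep [s + x] := by
  rw [List.foldl_cons, prefStep_singleton,
    show ([s] ++ [s + x] : List Int) = [s] ++ [s + x] by rfl,
    foldl_prefStep_append g [s] (s + x)]
  rfl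

theorem prefStep_getD (g : List Int) : ∀ (s : Int) (jn : Nat), jn ≤ g.length →
    (g.foldl prefStep [s]).getD jn 0 = s + (g.take jn).sum := by
  induction g with
  | nil =>
    intro s jn hj
    have : jn = 0 := by simpa using hj
    subst this
    simp
  | cons x g ih =>
    intro s jn hj
    rw [foldl_prefStep_cons]
    cases jn with
    | zero => simp
    | succ jn' =>
      rw [List.getD_cons_succ, ih (s + x) jn' (by simpa using hj)]
      simp only [List.take_succ_cons, List.sum_cons]
      ring

-- ---- properties of the inner index search ----
theorem idxJ_spec (n : Int) (a : List Int) (k : Int) :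
    0 ≤ idxJ n a k ∧ idxJ n a k ≤ ((sGaps n a).length : Int) ∧
    (∀ (i : Nat) (hi : i < (sGaps n a).length), (i : Int) < idxJ n a k → (sGaps n a)[i] < k) ∧
    (∀ (hj : (idxJ n a k).toNat < (sGaps n a).length), k ≤ (sGaps n a)[(idxJ n a k).toNat]) := by
  unfold idxJ
  have hpair : (sGaps n a).Pairwise (· ≤ ·) :=
    PySem.List.sorted_pairwise (rawGaps n a) (fun x => x)
  have hgetle0 := List.pairwise_iff_getElem.mp hpair
  have hgetle : ∀ (i j : Nat) (_hi : i < (sGaps n a).length) (_hj : j < (sGaps n a).length),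
      i ≤ j → (sGaps n a)[i] ≤ (sGaps n a)[j] := by
    intro i j hi hj hij
    rcases Nat.eq_or_lt_of_le hij with h | h
    · subst h; exact le_rfl
    · exact hgetle0 i j hi hj h
  have mono : ∀ x y, 0 ≤ x → x ≤ y → y < ((sGaps n a).length : Int) →
      (decide (PySem.List.pyGetD (sGaps n a) x 0 ≥ k)) = true →
      (decide (PySem.List.pyGetD (sGaps n a) y 0 ≥ k)) = true := by
    intro x y hx hxy hy hp
    simp only [decide_eq_true_eq, ge_iff_le] at hp ⊢
    rw [PySem.List.pyGetD_eq_getElem (sGaps n a) 0 hx (by omega)] at hp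
    rw [PySem.List.pyGetD_eq_getElem (sGaps n a) 0 (by omega) hy]
    exact le_trans hp (hgetle x.toNat y.toNat (by omega) (by omega) (by omega))
  obtain ⟨j1, j2, j3, j4⟩ := firstB_spec _ 0 _ (by positivity) mono
  refine ⟨j1, j2, ?_, ?_⟩
  · intro i hi hij
    have h3 := j3 (i : Int) (by positivity) hij
    simp only [decide_eq_false_iff_not, ge_iff_le, not_le] at h3
    rw [PySem.List.pyGetD_eq_getElem (sGaps n a) 0 (by positivity) (by exact_mod_cast hi)] at h3
    simpa using h3
  · intro hj
    have := j4 (by omega)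
    simp only [decide_eq_true_eq, ge_iff_le] at this
    rwa [PySem.List.pyGetD_eq_getElem (sGaps n a) 0 j1 (by omega)] at this

-- ---- the split sum over a sorted list ----
theorem sorted_min_sum (n : Int) (a : List Int) (k : Int) :
    ((sGaps n a).map (fun g => min k g)).sum =
      ((sGaps n a).take (idxJ n a k).toNat).sum +
        (((sGaps n a).length : Int) - idxJ n a k) * k := by
  obtain ⟨j1, j2, j3, j4⟩ := idxJ_spec n a k
  have hpair := List.pairwise_iff_getElem.mp
    (PySem.List.sorted_pairwise (rawGaps n a) (fun x => x))
  set g := sGaps n a with hg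
  set jn := (idxJ n a k).toNat with hjn
  have hjle : jn ≤ g.length := by omega
  have hsplit : g.map (fun x => min k x) =
      (g.take jn).map (fun x => min k x) ++ (g.drop jn).map (fun x => min k x) := by
    rw [← List.map_append, List.take_append_drop]
  have htake : (g.take jn).map (fun x => min k x) = g.take jn := by
    apply List.ext_getElem
    · simp
    · intro i h1 h2
      simp only [List.getElem_map, List.getElem_take]
      have hi : i < jn := (by simpa using h2 : i < jn ∧ i < g.length).1
      have := j3 i (by omega) (by omega)
      omega
  have hdrop : (g.drop jn).map (fun x => min k x) = List.replicate (g.length - jn) k := by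
    apply List.ext_getElem
    · simp
    · intro i h1 h2
      simp only [List.getElem_map, List.getElem_drop, List.getElem_replicate]
      have hlen : jn + i < g.length := by
        have : i < g.length - jn := by simpa using h2
        omega
      have hk : k ≤ g[jn] := j4 (by omega)
      have : g[jn] ≤ g[jn + i] := by
        rcases Nat.eq_zero_or_pos i with h | h
        · subst h; exact le_rfl
        · exact hpair jn (jn + i) (Nat.lt_of_le_of_lt (Nat.le_add_right jn i) hlen) hlen (Nat.lt_add_of_pos_right h)
      exact min_eq_left (hk.trans this)
  rw [hsplit, List.sum_append, htake, hdrop, List.sum_replicate, nsmul_eq_mul]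
  have : ((g.length - jn : Nat) : Int) = (g.length : Int) - idxJ n a k := by omega
  rw [this]

theorem totalB_eq_totalA (n : Int) (a : List Int) (k : Int) :
    totalB n a k = totalA n k a := by
  unfold totalB
  rcases le_or_gt n 0 with hn | hn
  · have hraw : rawGaps n a = [] := by
      unfold rawGaps
      rw [PySem.List.pyRange_one_eq_nil (by omega)]
      rfl
    have hg : sGaps n a = [] := by unfold sGaps; rw [hraw]; rfl
    have hj : idxJ n a k = 0 := by
      unfold idxJ
      rw [hg]
      rw [firstB, dif_neg (by simp)]
    rw [totalA_nonpos n k a hn, if_neg (by omega), hj, hg]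
    simp [PySem.List.pyGetD_zero_cons]
  · obtain ⟨j1, j2, j3, j4⟩ := idxJ_spec n a k
    rw [totalA_pos n k a (by omega), if_pos (by omega)]
    have hperm : ((rawGaps n a).map (fun g => min k g)).sum =
        ((sGaps n a).map (fun g => min k g)).sum :=
      (((PySem.List.sorted_perm (rawGaps n a) (fun x => x) false).map
        (fun g => min k g)).sum_eq).symm
    have hpref : PySem.List.pyGetD ((sGaps n a).foldl prefStep [0]) (idxJ n a k) 0 =
        ((sGaps n a).take (idxJ n a k).toNat).sum := by
      have h0 : idxJ n a k = (((idxJ n a k).toNat : Nat) : Int) := by omega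
      rw [h0, PySem.List.pyGetD_natCast, prefStep_getD (sGaps n a) 0 (idxJ n a k).toNat (by omega),
        zero_add]
      congr 1
    rw [hpref, hperm, sorted_min_sum n a k]

-- ===== VERDICT (by name: the statement is the Claim_ definition above) =====
theorem solve_spec : Claim_equal_solve := by
  intro n h_ a _hdom hpre
  unfold Spec_solve
  obtain ⟨hh, _⟩ := hpre
  have mono := totalA_mono n a
  have hA := solveLoop_spec n h_ a mono 0 h_ h_ (by omega) (by omega)
  have hB := firstB_spec (fun k => decide (totalB n a k ≥ h_)) 0 (h_ + 1) (by omega)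
    (by
      intro x y _ hxy _ hx
      simp only [decide_eq_true_eq, ge_iff_le] at *
      calc h_ ≤ totalB n a x := hx
        _ = totalA n x a := totalB_eq_totalA n a x
        _ ≤ totalA n y a := mono x y hxy
        _ = totalB n a y := (totalB_eq_totalA n a y).symm)
  rw [solve_alt_eq]
  unfold solve
  obtain ⟨a1, a2, a3, a4⟩ := hA
  obtain ⟨b1, b2, b3, b4⟩ := hB
  refine least_unique (fun x => h_ ≤ totalA n x a) 0 (h_ + 1) _ _ a1 a2
    (fun x hx hx2 => by simpa using not_le.mpr (a3 x hx hx2)) (fun hlt => a4 (by omega))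
    b1 b2
    (fun x hx hx2 => by
      have := b3 x hx hx2
      simp only [decide_eq_false_iff_not, ge_iff_le] at this
      intro hc
      exact this (by rw [totalB_eq_totalA n a x]; exact hc))
    (fun hlt => by
      have := b4 hlt
      simp only [decide_eq_true_eq, ge_iff_le] at this
      rwa [totalB_eq_totalA n a _] at this)
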